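-- pv_equiv track=rewrite | github.com/beisutsukai/mastermind_solver | main.py | check_if_pattern_applies_on_combination
-- ===== SOURCE A (Python) =====
-- from itertools import combinations
--
-- def check_if_pattern_applies_on_combination(pattern, pattern_combination, combination_to_validate):
--     red_hints = pattern[0]
--     white_hints = pattern[1]
--     total_hints = red_hints + white_hints
--
--     # If no hints at all, we just want to check that there are no common colors
--     if total_hints == 0:
--         for color_from_pattern in pattern_combination:
--             if color_from_pattern in combination_to_validate:
--                 return False
--         return True
--
--     # Is there a common colors combination between pattern_combination and combination_to_validate ?
--     color_possible_from_pattern  = list(combinations(pattern_combination, total_hints))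
--     color_possible_in_validation = list(combinations(combination_to_validate, total_hints))
--
--     # convert to lists (can be sorted, but tuples cannot)
--     color_possible_from_pattern = [list(ele) for ele in color_possible_from_pattern]
--     color_possible_in_validation = [list(ele) for ele in color_possible_in_validation]
--     [ele.sort() for ele in color_possible_from_pattern]
--     [ele.sort() for ele in color_possible_in_validation]
--
--     for color_combination in color_possible_from_pattern:
--         color_combination = list(color_combination)
--         color_combination.sort()  # sort to avoid some comparison problems (we are not checking the order yet, only colors)
--
--         if color_combination in color_possible_in_validation:
--             # We also have to check if the remaining colors (not in the common combination) are differents.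
--             # If not, false, because we should have more red or white hints
--             remaining_pattern_colors = pattern_combination.copy()
--             remaining_validation_colors = combination_to_validate.copy()
--             for color in color_combination:
--                 remaining_pattern_colors.remove(color)
--                 remaining_validation_colors.remove(color)
--             for remaining_color in remaining_pattern_colors:
--                 if remaining_color in remaining_validation_colors:
--                     return False
--
--             # Among colors in common, are there exactly as many at the same position as the red hints ?
--             index_color = 0
--             same_positions = 0
--             for color_from_pattern in pattern_combination:
--                 if color_from_pattern in color_combination:
--                     if pattern_combination[index_color] == combination_to_validate[index_color]:
--                         same_positions = same_positions + 1
--                         # We don't want to reuse a color that is only once in the common combination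
--                         color_combination.remove(color_from_pattern) # remove only remove first occurrence
--                 index_color = index_color + 1
--             if same_positions == red_hints:
--                 return True
--     return False
-- ===== SOURCE B (Python) =====
-- from collections import Counter
--
-- def check_if_pattern_applies_on_combination(pattern, pattern_combination, combination_to_validate):
--     red_hints = pattern[0]
--     white_hints = pattern[1]
--     exact = sum(a == b for a, b in zip(pattern_combination, combination_to_validate))
--     overlap = sum((Counter(pattern_combination) & Counter(combination_to_validate)).values())
--     return exact == red_hints and overlap == red_hints + white_hints
-- ===== Notes on version B (the rewrite author's own statement) =====
-- stated objective: alternative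
-- what changed: Instead of enumerating size-(red+white) sub-combinations of both lists, sorting them, and doing remove-based duplicate bookkeeping, B counts positional matches (exact) and the multiset colour-intersection size (overlap) in one pass each and returns exact==red and overlap==red+white, with no special branch for zero hints.
-- outside the precondition, e.g. on check_if_pattern_applies_on_combination((-1, 1), [], []): A returns True, B returns False; on check_if_pattern_applies_on_combination((1, 0), ['x', 'y'], ['z']): A returns False, B returns False
import Mathlib
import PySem

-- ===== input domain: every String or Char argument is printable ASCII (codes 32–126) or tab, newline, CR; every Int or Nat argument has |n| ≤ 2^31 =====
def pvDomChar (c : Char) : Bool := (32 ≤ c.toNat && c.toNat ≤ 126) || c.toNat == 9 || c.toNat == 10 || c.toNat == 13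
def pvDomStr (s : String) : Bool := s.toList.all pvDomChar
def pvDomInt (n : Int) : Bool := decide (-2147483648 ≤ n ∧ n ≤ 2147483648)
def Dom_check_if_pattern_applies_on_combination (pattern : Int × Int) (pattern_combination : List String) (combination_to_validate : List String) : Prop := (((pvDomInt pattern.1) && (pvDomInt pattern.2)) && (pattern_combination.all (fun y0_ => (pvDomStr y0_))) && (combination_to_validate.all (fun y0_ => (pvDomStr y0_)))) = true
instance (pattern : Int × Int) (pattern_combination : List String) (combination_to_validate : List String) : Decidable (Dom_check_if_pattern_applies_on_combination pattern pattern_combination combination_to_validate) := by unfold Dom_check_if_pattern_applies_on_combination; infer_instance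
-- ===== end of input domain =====

-- B replaces A's enumeration of all size-(red+white) sub-combinations by two direct counts
-- (positional matches and multiset colour overlap); objective: alternative algorithm, same result.

-- ===== PORT A =====

-- itertools.combinations(xs, n), each tuple as a list, in Python's emission order
def pyCombos : List String → Nat → List (List String)
  | _, 0 => [[]]
  | [], _ + 1 => []
  | x :: rest, n + 1 => (pyCombos rest n).map (fun c => x :: c) ++ pyCombos rest (n + 1)

-- ele.sort() on a list of strings (Python's default ascending sort)
def sortS (xs : List String) : List String := PySem.List.sorted xs (fun s => s) false

-- successive list.remove(color) for color in c (each remove succeeds wherever Python reaches it;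
-- getD keeps the list unchanged on the unreachable failure case)
def removeAll (xs : List String) (c : List String) : List String :=
  c.foldl (fun acc col => (PySem.List.remove? acc col).getD acc) xs

-- the same_positions loop: iterate pattern_combination with index_color; pattern_combination[index_color]
-- is the loop variable itself; combination_to_validate[index_color] via pyGet? (none = IndexError,
-- excluded by Pre_; the port returns the current count there, an arbitrary value)
def spLoop (cv : List String) : List String → List String → Int → Int → Int
  | [], _, _, cnt => cnt
  | x :: xs, c, i, cnt =>
    if c.contains x then
      match PySem.List.pyGet? cv i with
      | none => cnt
      | some y =>
        if x = y then spLoop cv xs ((PySem.List.remove? c x).getD c) (i + 1) (cnt + 1)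
        else spLoop cv xs c (i + 1) cnt
    else spLoop cv xs c (i + 1) cnt

-- the main 'for color_combination in color_possible_from_pattern' loop with its early returns
def mainLoop (red : Int) (pc cv : List String) (cpv : List (List String)) : List (List String) → Bool
  | [] => false
  | c :: rest =>
    let c' := sortS c
    if cpv.contains c' then
      let remP := removeAll pc c'
      let remV := removeAll cv c'
      if remP.any (fun col => remV.contains col) then false
      else if spLoop cv pc c' 0 0 = red then true
      else mainLoop red pc cv cpv rest
    else mainLoop red pc cv cpv rest

def check_if_pattern_applies_on_combination (pattern : Int × Int) (pattern_combination : List String) (combination_to_validate : List String) : Bool :=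
  let red := pattern.1
  let white := pattern.2
  let total := red + white
  if total = 0 then
    -- for color in pattern_combination: if color in combination_to_validate: return False; return True
    pattern_combination.all (fun color => !(combination_to_validate.contains color))
  else
    let cpp := (pyCombos pattern_combination total.toNat).map sortS
    let cpv := (pyCombos combination_to_validate total.toNat).map sortS
    mainLoop red pattern_combination combination_to_validate cpv cpp

-- ===== PORT B =====

def check_if_pattern_applies_on_combination_alt (pattern : Int × Int) (pattern_combination : List String) (combination_to_validate : List String) : Bool :=
  let exact : Int := (pattern_combination.zip combination_to_validate).foldl
    (fun acc p => acc + (if p.1 = p.2 then 1 else 0)) 0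
  -- sum((Counter(pc) & Counter(cv)).values()): per distinct colour of pc, min of the two counts
  let overlap : Int := (PySem.List.dedup pattern_combination).foldl
    (fun acc x => acc + min ((PySem.List.count pattern_combination x : Int)) ((PySem.List.count combination_to_validate x : Int))) 0
  decide (exact = pattern.1) && decide (overlap = pattern.1 + pattern.2)

-- ===== PRECONDITION & SPEC =====

-- Pre_ restricts to the natural Mastermind domain and A's non-raising inputs: negative total hints make
-- A raise ValueError in combinations(); red = -white ≠ 0 (outside the natural domain of hint counts) makes
-- A's total==0 branch return an accidental True that ignores the hint values; a pattern longer than the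
-- validation can make A raise IndexError in the positional loop unless total is 0 or exceeds the
-- validation length (the excluded still-returning length cases agree with B anyway, see cites).
def Pre_check_if_pattern_applies_on_combination (pattern : Int × Int) (pattern_combination : List String) (combination_to_validate : List String) : Prop :=
  0 ≤ pattern.1 + pattern.2 ∧
  (pattern.1 + pattern.2 = 0 → pattern.1 = 0) ∧
  (pattern_combination.length ≤ combination_to_validate.length ∨ pattern.1 + pattern.2 = 0 ∨
    (combination_to_validate.length : Int) < pattern.1 + pattern.2)
instance (pattern : Int × Int) (pattern_combination : List String) (combination_to_validate : List String) : Decidable (Pre_check_if_pattern_applies_on_combination pattern pattern_combination combination_to_validate) := by unfold Pre_check_if_pattern_applies_on_combination; infer_instance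

def pvWitness_check_if_pattern_applies_on_combination : (Int × Int) × List String × List String :=
  ((1, 1), ["red", "blue", "green"], ["blue", "yellow", "red"])

def Spec_check_if_pattern_applies_on_combination (pattern : Int × Int) (pattern_combination : List String) (combination_to_validate : List String) (out : Bool) : Prop := out = check_if_pattern_applies_on_combination_alt pattern pattern_combination combination_to_validate
instance (pattern : Int × Int) (pattern_combination : List String) (combination_to_validate : List String) (out : Bool) : Decidable (Spec_check_if_pattern_applies_on_combination pattern pattern_combination combination_to_validate out) := by unfold Spec_check_if_pattern_applies_on_combination; infer_instance

-- ===== CLAIM (what is proved, stated in full; the proofs are below) =====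
def Claim_equal_check_if_pattern_applies_on_combination : Prop := ∀ (pattern : Int × Int) (pattern_combination : List String) (combination_to_validate : List String), Dom_check_if_pattern_applies_on_combination pattern pattern_combination combination_to_validate → Pre_check_if_pattern_applies_on_combination pattern pattern_combination combination_to_validate → Spec_check_if_pattern_applies_on_combination pattern pattern_combination combination_to_validate (check_if_pattern_applies_on_combination pattern pattern_combination combination_to_validate)

-- ===== LEMMAS AND PROOFS =====

-- B's exact-count fold is a countP
theorem pvExactFold (l : List (String × String)) (init : Int) :
    l.foldl (fun acc p => acc + (if p.1 = p.2 then 1 else 0)) init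
      = init + (l.countP (fun p => decide (p.1 = p.2)) : Int) := by
  induction l generalizing init with
  | nil => simp
  | cons p t ih => simp [List.countP_cons, ih]; split_ifs <;> push_cast <;> ring

-- pyCombos enumerates exactly the length-n sublists
theorem pvMemCombos : ∀ (xs : List String) (n : Nat) (c : List String),
    c ∈ pyCombos xs n ↔ c.Sublist xs ∧ c.length = n := by
  intro xs
  induction xs with
  | nil =>
    intro n c
    cases n with
    | zero =>
      simp only [pyCombos, List.mem_singleton]
      constructor
      · rintro rfl; exact ⟨List.Sublist.refl _, rfl⟩
      · rintro ⟨h, hl⟩; exact List.length_eq_zero_iff.mp hl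
    | succ n =>
      simp only [pyCombos, List.not_mem_nil, false_iff, not_and]
      intro h; have := List.sublist_nil.mp h; subst this; simp
  | cons x rest ih =>
    intro n c
    cases n with
    | zero =>
      simp only [pyCombos, List.mem_singleton]
      constructor
      · rintro rfl; exact ⟨List.nil_sublist _, rfl⟩
      · rintro ⟨h, hl⟩; exact List.length_eq_zero_iff.mp hl
    | succ n =>
      simp only [pyCombos, List.mem_append, List.mem_map, ih]
      constructor
      · rintro (⟨d, ⟨hd, hlen⟩, rfl⟩ | ⟨hs, hlen⟩)
        · exact ⟨List.Sublist.cons₂ x hd, by simp [hlen]⟩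
        · exact ⟨List.Sublist.cons x hs, hlen⟩
      · rintro ⟨hs, hlen⟩
        rcases List.sublist_cons_iff.mp hs with h | ⟨r, rfl, hr⟩
        · right; exact ⟨h, hlen⟩
        · left; exact ⟨r, ⟨hr, by simpa using hlen⟩, rfl⟩

theorem pvSortSCoe (xs : List String) : ((sortS xs : List String) : Multiset String) = (xs : Multiset String) :=
  Multiset.coe_eq_coe.mpr (PySem.List.sorted_perm xs (fun s => s) false)

theorem pvSortSEq (a b : List String) : sortS a = sortS b ↔ a.Perm b :=
  PySem.List.sorted_id_eq_sorted_id_iff_perm a b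

-- membership of sorted c in the sorted validation combinations
theorem pvContainsCpv (cv c : List String) (n : Nat) :
    (((pyCombos cv n).map sortS).contains (sortS c) = true)
      ↔ ((c : Multiset String) ≤ (cv : Multiset String) ∧ c.length = n) := by
  rw [List.contains_iff_mem]
  simp only [List.mem_map]
  constructor
  · rintro ⟨d, hd, hsort⟩
    rw [pvMemCombos] at hd
    have hperm := (pvSortSEq d c).mp hsort
    refine ⟨Multiset.coe_le.mpr ⟨d, hperm, hd.1⟩, by rw [← hperm.length_eq]; exact hd.2⟩
  · rintro ⟨hle, hlen⟩
    rcases Multiset.coe_le.mp hle with ⟨d, hperm, hsub⟩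
    exact ⟨d, (pvMemCombos cv n d).mpr ⟨hsub, hperm.length_eq.trans hlen⟩, (pvSortSEq d c).mpr hperm⟩

theorem pvRemoveAllCoe : ∀ (c xs : List String), (c : Multiset String) ≤ (xs : Multiset String) →
    ((removeAll xs c : List String) : Multiset String) = (xs : Multiset String) - (c : Multiset String) := by
  intro c
  induction c with
  | nil => intro xs _; simp [removeAll]
  | cons a t ih =>
    intro xs h
    have hmemM : a ∈ (xs : Multiset String) := Multiset.mem_of_le h (by simp)
    have hmem : a ∈ xs := by simpa using hmemM
    have hstep : removeAll xs (a :: t) = removeAll (xs.erase a) t := by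
      simp [removeAll, PySem.List.remove?_eq_some_erase xs a hmem]
    have hle : (t : Multiset String) ≤ ((xs.erase a : List String) : Multiset String) := by
      have h' := Multiset.erase_le_erase a h
      simpa using h'
    rw [hstep, ih _ hle]
    apply Multiset.ext.mpr
    intro z
    simp only [Multiset.count_sub, Multiset.coe_count, List.count_erase, List.count_cons]
    by_cases hz : z = a
    · subst hz; simp; omega
    · have h1 : ¬ (a == z) = true := by simp [beq_iff_eq]; exact fun h => hz h.symm
      have h2 : ¬ (z == a) = true := by simp [beq_iff_eq, hz]
      simp [h1, h2]

-- multiset subtraction commutes with intersection of the two remainders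
theorem pvInterSub (P V C : Multiset String) (hP : C ≤ P) (hV : C ≤ V) :
    (P - C) ∩ (V - C) = (P ∩ V) - C := by
  apply Multiset.ext.mpr
  intro z
  have h1 := Multiset.le_iff_count.mp hP z
  have h2 := Multiset.le_iff_count.mp hV z
  simp only [Multiset.count_inter, Multiset.count_sub]
  omega

-- the remaining-colors overlap test
theorem pvAnyContains (xs ys : List String) :
    (xs.any (fun col => ys.contains col) = true)
      ↔ ((xs : Multiset String) ∩ (ys : Multiset String) ≠ 0) := by
  constructor
  · intro h
    simp only [List.any_eq_true, List.contains_iff_mem] at h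
    rcases h with ⟨x, hx, hy⟩
    intro h0
    have : x ∈ (xs : Multiset String) ∩ (ys : Multiset String) := by
      rw [Multiset.mem_inter]; exact ⟨by simpa using hx, by simpa using hy⟩
    rw [h0] at this; simp at this
  · intro h
    rcases Multiset.exists_mem_of_ne_zero h with ⟨x, hx⟩
    rw [Multiset.mem_inter] at hx
    simp only [List.any_eq_true, List.contains_iff_mem]
    exact ⟨x, by simpa using hx.1, by simpa using hx.2⟩

-- per-colour positional matches are bounded by both colour counts
theorem pvMatchCLe : ∀ (pc cv : List String) (x : String),
    (pc.zip cv).countP (fun p => decide (p.1 = x ∧ p.2 = x))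
      ≤ min (pc.count x) (cv.count x) := by
  intro pc
  induction pc with
  | nil => intro cv x; simp
  | cons a t ih =>
    intro cv x
    cases cv with
    | nil => simp
    | cons b s =>
      have hih := ih s x
      rw [List.zip_cons_cons, List.countP_cons, List.count_cons, List.count_cons]
      by_cases hax : a = x <;> by_cases hbx : b = x
      · rw [if_pos (by simp only [decide_eq_true_eq]; exact ⟨hax, hbx⟩),
            if_pos (beq_iff_eq.mpr hax), if_pos (beq_iff_eq.mpr hbx)]
        omega
      · rw [if_neg (by simp only [decide_eq_true_eq]; exact fun h => hbx h.2),
            if_pos (beq_iff_eq.mpr hax),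
            if_neg (fun h => hbx (beq_iff_eq.mp h))]
        omega
      · rw [if_neg (by simp only [decide_eq_true_eq]; exact fun h => hax h.1),
            if_neg (fun h => hax (beq_iff_eq.mp h)),
            if_pos (beq_iff_eq.mpr hbx)]
        omega
      · rw [if_neg (by simp only [decide_eq_true_eq]; exact fun h => hax h.1),
            if_neg (fun h => hax (beq_iff_eq.mp h)),
            if_neg (fun h => hbx (beq_iff_eq.mp h))]
        omega

-- the same_positions loop counts exactly the positional matches
theorem pvSpLoop (cv : List String) :
    ∀ (xs : List String) (i : Nat) (c : List String) (cnt : Int),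
      i + xs.length ≤ cv.length →
      (∀ x : String, (xs.zip (cv.drop i)).countP (fun p => decide (p.1 = x ∧ p.2 = x))
          ≤ (c : Multiset String).count x) →
      spLoop cv xs c (i : Int) cnt
        = cnt + ((xs.zip (cv.drop i)).countP (fun p => decide (p.1 = p.2)) : Int) := by
  intro xs
  induction xs with
  | nil => intro i c cnt _ _; simp [spLoop]
  | cons x t ih =>
    intro i c cnt hlen hinv
    have hi : i < cv.length := by simp at hlen; omega
    have hdrop : cv.drop i = cv[i] :: cv.drop (i + 1) := List.drop_eq_getElem_cons hi
    rw [hdrop] at hinv ⊢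
    have hget : PySem.List.pyGet? cv (i : Int) = some cv[i] := by
      rw [PySem.List.pyGet?_natCast]; exact List.getElem?_eq_getElem hi
    have hcast : ((i : Nat) : Int) + 1 = ((i + 1 : Nat) : Int) := by push_cast; ring
    have hlen' : (i + 1) + t.length ≤ cv.length := by simp at hlen; omega
    by_cases hx : x = cv[i]
    · have hpos : 0 < ((x :: t).zip (cv[i] :: cv.drop (i + 1))).countP
          (fun p => decide (p.1 = x ∧ p.2 = x)) := by
        rw [List.zip_cons_cons, List.countP_cons, if_pos (by simp [← hx])]
        omega
      have hmemc : x ∈ c := by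
        have h1 := lt_of_lt_of_le hpos (hinv x)
        have h2 := Multiset.count_pos.mp h1
        simpa using h2
      have hcont : c.contains x = true := List.contains_iff_mem.mpr hmemc
      have hrem : PySem.List.remove? c x = some (c.erase x) :=
        PySem.List.remove?_eq_some_erase c x hmemc
      have hinv' : ∀ z : String,
          ((t.zip (cv.drop (i + 1))).countP (fun p => decide (p.1 = z ∧ p.2 = z)))
            ≤ ((c.erase x : List String) : Multiset String).count z := by
        intro z
        have hz := hinv z
        rw [List.zip_cons_cons, List.countP_cons] at hz
        by_cases hzx : z = x
        · subst hzx
          rw [if_pos (by simp [← hx])] at hz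
          have he : ((c.erase z : List String) : Multiset String).count z
              = (c : Multiset String).count z - 1 := by
            simp [Multiset.coe_count, List.count_erase]
          omega
        · rw [if_neg (by simp; intro h _; exact absurd h.symm hzx)] at hz
          have he : ((c.erase x : List String) : Multiset String).count z
              = (c : Multiset String).count z := by
            simp only [Multiset.coe_count, List.count_erase, beq_iff_eq]
            rw [if_neg (fun h => hzx h.symm)]
            simp
          omega
      have hstep : spLoop cv (x :: t) c (i : Int) cnt
          = spLoop cv t (c.erase x) (((i : Nat) : Int) + 1) (cnt + 1) := by
        subst hx
        simp [spLoop, hcont, hget, hrem]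
        exact fun h => absurd hmemc h
      rw [hstep, hcast, ih (i + 1) (c.erase x) (cnt + 1) hlen' hinv']
      rw [List.zip_cons_cons, List.countP_cons, if_pos (by simp [hx])]
      push_cast
      ring
    · have hstep : spLoop cv (x :: t) c (i : Int) cnt
          = spLoop cv t c (((i : Nat) : Int) + 1) cnt := by
        by_cases hcont : c.contains x = true
        · simp [spLoop, hcont, hget, hx]
        · simp [spLoop, hcont]
          exact fun h => (hcont (List.contains_iff_mem.mpr h)).elim
      have hinv' : ∀ z : String,
          ((t.zip (cv.drop (i + 1))).countP (fun p => decide (p.1 = z ∧ p.2 = z)))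
            ≤ (c : Multiset String).count z := by
        intro z
        have hz := hinv z
        rw [List.zip_cons_cons, List.countP_cons] at hz
        rw [if_neg (by simp; intro h1 h2; exact hx (h1.trans h2.symm))] at hz
        omega
      rw [hstep, hcast, ih (i + 1) c cnt hlen' hinv']
      rw [List.zip_cons_cons, List.countP_cons, if_neg (by simp [hx])]
      simp

-- main loop returns false whenever the overlap is not exactly n
theorem pvMainLoopNe (red : Int) (pc cv : List String) (n : Nat)
    (hm : Multiset.card ((pc : Multiset String) ∩ (cv : Multiset String)) ≠ n) :
    ∀ l, (∀ c ∈ l, ((c : List String) : Multiset String) ≤ (pc : Multiset String) ∧ c.length = n) →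
      mainLoop red pc cv ((pyCombos cv n).map sortS) l = false := by
  intro l
  induction l with
  | nil => simp [mainLoop]
  | cons c rest ih =>
    intro hl
    obtain ⟨hleP, hlen⟩ := hl c (List.mem_cons_self ..)
    by_cases hcont : (((pyCombos cv n).map sortS).contains (sortS c)) = true
    · obtain ⟨hleV, _⟩ := (pvContainsCpv cv c n).mp hcont
      have hleI : (c : Multiset String) ≤ (pc : Multiset String) ∩ (cv : Multiset String) :=
        Multiset.le_inter hleP hleV
      have hcard : n ≤ Multiset.card ((pc : Multiset String) ∩ (cv : Multiset String)) := by
        have hcc := Multiset.card_le_card hleI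
        rwa [Multiset.coe_card, hlen] at hcc
      have hlt : n < Multiset.card ((pc : Multiset String) ∩ (cv : Multiset String)) := by omega
      have hany : ((removeAll pc (sortS c)).any
          (fun col => (removeAll cv (sortS c)).contains col)) = true := by
        rw [pvAnyContains]
        rw [pvRemoveAllCoe _ _ (by rw [pvSortSCoe]; exact hleP),
            pvRemoveAllCoe _ _ (by rw [pvSortSCoe]; exact hleV), pvSortSCoe,
            pvInterSub _ _ _ hleP hleV]
        intro h0
        have hadd : ((pc : Multiset String) ∩ (cv : Multiset String) - (c : Multiset String))
            + (c : Multiset String) = (pc : Multiset String) ∩ (cv : Multiset String) :=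
          tsub_add_cancel_of_le hleI
        have hcs := congrArg Multiset.card hadd
        rw [h0, zero_add, Multiset.coe_card, hlen] at hcs
        omega
      simp only [mainLoop, hcont, if_true, hany]
    · simp only [mainLoop, hcont]
      simp only [Bool.false_eq_true, if_false]
      exact ih (fun d hd => hl d (List.mem_cons_of_mem _ hd))

-- main loop when the overlap is exactly n
theorem pvMainLoopEq (red : Int) (pc cv : List String) (n : Nat)
    (hm : Multiset.card ((pc : Multiset String) ∩ (cv : Multiset String)) = n)
    (hlen : pc.length ≤ cv.length) :
    ∀ l, (∀ c ∈ l, ((c : List String) : Multiset String) ≤ (pc : Multiset String) ∧ c.length = n) →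
      mainLoop red pc cv ((pyCombos cv n).map sortS) l
        = ((l.any (fun c => decide ((c : Multiset String) ≤ (cv : Multiset String))))
            && decide (((pc.zip cv).countP (fun p => decide (p.1 = p.2)) : Int) = red)) := by
  intro l
  induction l with
  | nil => simp [mainLoop]
  | cons c rest ih =>
    intro hl
    obtain ⟨hleP, hclen⟩ := hl c (List.mem_cons_self ..)
    by_cases hcont : (((pyCombos cv n).map sortS).contains (sortS c)) = true
    · obtain ⟨hleV, _⟩ := (pvContainsCpv cv c n).mp hcont
      have hleI : (c : Multiset String) ≤ (pc : Multiset String) ∩ (cv : Multiset String) :=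
        Multiset.le_inter hleP hleV
      have hceq : (pc : Multiset String) ∩ (cv : Multiset String) = (c : Multiset String) :=
        (Multiset.eq_of_le_of_card_le hleI
          (by rw [Multiset.coe_card, hclen, hm])).symm
      have hany : ((removeAll pc (sortS c)).any
          (fun col => (removeAll cv (sortS c)).contains col)) = false := by
        rw [← Bool.not_eq_true, pvAnyContains]
        rw [pvRemoveAllCoe _ _ (by rw [pvSortSCoe]; exact hleP),
            pvRemoveAllCoe _ _ (by rw [pvSortSCoe]; exact hleV), pvSortSCoe,
            pvInterSub _ _ _ hleP hleV, hceq]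
        simp
      have hsp : spLoop cv pc (sortS c) 0 0
          = ((pc.zip cv).countP (fun p => decide (p.1 = p.2)) : Int) := by
        have hinv0 : ∀ x : String,
            ((pc.zip cv).countP (fun p => decide (p.1 = x ∧ p.2 = x)))
              ≤ ((sortS c : List String) : Multiset String).count x := by
          intro x
          rw [pvSortSCoe, ← hceq]
          simp only [Multiset.count_inter, Multiset.coe_count]
          have := pvMatchCLe pc cv x
          omega
        have h := pvSpLoop cv pc 0 (sortS c) 0 (by simpa using hlen) (by simpa using hinv0)
        simpa using h
      simp only [mainLoop, hcont, if_true, hany, Bool.false_eq_true, if_false, hsp]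
      by_cases hred : ((pc.zip cv).countP (fun p => decide (p.1 = p.2)) : Int) = red
      · simp [hred, List.any_cons]
        exact Or.inl (Multiset.coe_le.mp hleV)
      · simp only [hred, if_false]
        rw [ih (fun d hd => hl d (List.mem_cons_of_mem _ hd))]
        simp [hred]
    · have hnotle : ¬ ((c : Multiset String) ≤ (cv : Multiset String)) := by
        intro hle
        exact hcont ((pvContainsCpv cv c n).mpr ⟨hle, hclen⟩)
      have hnsp : ¬ c.Subperm cv := fun h => hnotle (Multiset.coe_le.mpr h)
      simp only [mainLoop, hcont, Bool.false_eq_true, if_false]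
      rw [ih (fun d hd => hl d (List.mem_cons_of_mem _ hd))]
      simp [List.any_cons, hnsp]

-- whenever n ≤ overlap there is a common sub-combination of size n
theorem pvExistsPass (pc cv : List String) (n : Nat)
    (hn : n ≤ Multiset.card ((pc : Multiset String) ∩ (cv : Multiset String))) :
    ∃ c ∈ pyCombos pc n, ((c : Multiset String) ≤ (cv : Multiset String)) := by
  set I := (pc : Multiset String) ∩ (cv : Multiset String) with hI
  have hcoe : (I.toList : Multiset String) = I := Multiset.coe_toList I
  have htle : ((I.toList.take n : List String) : Multiset String) ≤ I := by
    have h1 : ((I.toList.take n : List String) : Multiset String)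
        ≤ ((I.toList : List String) : Multiset String) :=
      Multiset.coe_le.mpr (List.take_sublist n I.toList).subperm
    rwa [hcoe] at h1
  have htlen : (I.toList.take n).length = n := by
    rw [List.length_take]
    have : I.toList.length = Multiset.card I := Multiset.length_toList I
    omega
  have hlep : ((I.toList.take n : List String) : Multiset String) ≤ (pc : Multiset String) :=
    le_trans htle (Multiset.inter_le_left ..)
  rcases Multiset.coe_le.mp hlep with ⟨d, hperm, hdsub⟩
  refine ⟨d, (pvMemCombos pc n d).mpr ⟨hdsub, hperm.length_eq.trans htlen⟩, ?_⟩
  have : (d : Multiset String) = ((I.toList.take n : List String) : Multiset String) :=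
    Multiset.coe_eq_coe.mpr hperm
  rw [this]
  exact le_trans htle (Multiset.inter_le_right ..)

-- B's overlap fold computes the multiset intersection size
theorem pvFoldlAddMap (l : List String) (f : String → Int) (init : Int) :
    l.foldl (fun a x => a + f x) init = init + (l.map f).sum := by
  induction l generalizing init with
  | nil => simp
  | cons x t ih => simp [ih]; ring

theorem pvSumCast (l : List String) (g : String → Nat) :
    (l.map (fun x => ((g x : Nat) : Int))).sum = (((l.map g).sum : Nat) : Int) := by
  induction l with
  | nil => simp
  | cons x t ih => simp [ih]

theorem pvOverlapEq (pc cv : List String) :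
    (PySem.List.dedup pc).foldl
        (fun acc x => acc + min ((PySem.List.count pc x : Int)) ((PySem.List.count cv x : Int))) 0
      = (Multiset.card ((pc : Multiset String) ∩ (cv : Multiset String)) : Int) := by
  have hfun : ∀ x : String,
      min ((PySem.List.count pc x : Int)) ((PySem.List.count cv x : Int))
        = ((min (pc.count x) (cv.count x) : Nat) : Int) := by
    intro x
    rw [PySem.List.count_eq, PySem.List.count_eq]
    exact (Nat.cast_min ..).symm
  have h1 : (PySem.List.dedup pc).foldl
        (fun acc x => acc + min ((PySem.List.count pc x : Int)) ((PySem.List.count cv x : Int))) 0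
      = ((PySem.List.dedup pc).map (fun x => ((min (pc.count x) (cv.count x) : Nat) : Int))).sum := by
    rw [pvFoldlAddMap]
    simp only [hfun, zero_add]
  rw [h1, pvSumCast]
  congr 1
  -- Nat statement: sum of mins over the distinct colours of pc = card of the intersection
  have hfin : ((PySem.List.dedup pc).toFinset : Finset String) = pc.toFinset := by
    apply Finset.ext
    intro x
    simp [List.mem_toFinset, PySem.List.mem_dedup]
  have hsum : ((PySem.List.dedup pc).map (fun x => min (pc.count x) (cv.count x))).sum
      = ∑ x ∈ pc.toFinset, min (pc.count x) (cv.count x) := by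
    rw [← List.sum_toFinset _ (PySem.List.nodup_dedup pc), hfin]
  rw [hsum]
  have hsub : ((pc : Multiset String) ∩ (cv : Multiset String)).toFinset ⊆ pc.toFinset := by
    intro x hx
    rw [Multiset.mem_toFinset, Multiset.mem_inter] at hx
    rw [List.mem_toFinset]
    simpa using hx.1
  have hcongr : ∑ x ∈ pc.toFinset, min (pc.count x) (cv.count x)
      = ∑ x ∈ pc.toFinset,
          Multiset.count x ((pc : Multiset String) ∩ (cv : Multiset String)) := by
    apply Finset.sum_congr rfl
    intro x _
    simp [Multiset.count_inter, Multiset.coe_count]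
  have h0 : ∀ x ∈ pc.toFinset,
      x ∉ ((pc : Multiset String) ∩ (cv : Multiset String)).toFinset →
      Multiset.count x ((pc : Multiset String) ∩ (cv : Multiset String)) = 0 :=
    fun x _ hx => Multiset.count_eq_zero.mpr (fun hmem => hx (Multiset.mem_toFinset.mpr hmem))
  rw [hcongr, ← Finset.sum_subset hsub h0]
  exact Multiset.toFinset_sum_count_eq _

theorem pvMatchZero (pc cv : List String) (hd : ∀ x ∈ pc, x ∉ cv) :
    (pc.zip cv).countP (fun p => decide (p.1 = p.2)) = 0 := by
  rw [List.countP_eq_zero]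
  intro p hp
  obtain ⟨h1, h2⟩ := List.of_mem_zip hp
  simp only [decide_eq_true_eq]
  intro he
  exact hd p.1 h1 (he ▸ h2)

-- ===== VERDICT (by name: the statement is the Claim_ definition above) =====
theorem check_if_pattern_applies_on_combination_spec : Claim_equal_check_if_pattern_applies_on_combination := by
  unfold Claim_equal_check_if_pattern_applies_on_combination
  intro pattern pc cv hdom hpre
  unfold Spec_check_if_pattern_applies_on_combination
  obtain ⟨red, white⟩ := pattern
  obtain ⟨h0, hzero, hdisj⟩ := hpre
  simp only at h0 hzero hdisj
  have hB : check_if_pattern_applies_on_combination_alt (red, white) pc cv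
      = (decide (((pc.zip cv).countP (fun p => decide (p.1 = p.2)) : Int) = red)
          && decide ((Multiset.card ((pc : Multiset String) ∩ (cv : Multiset String)) : Int)
              = red + white)) := by
    unfold check_if_pattern_applies_on_combination_alt
    rw [pvExactFold, pvOverlapEq]
    simp
  rw [hB]
  by_cases ht : red + white = 0
  · have hred : red = 0 := hzero ht
    have hwhite : white = 0 := by omega
    subst hred; subst hwhite
    have hA : check_if_pattern_applies_on_combination (0, 0) pc cv
        = pc.all (fun color => !(cv.contains color)) := by
      unfold check_if_pattern_applies_on_combination
      simp
    rw [hA]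
    by_cases hd : ∀ x ∈ pc, x ∉ cv
    · have hall : pc.all (fun color => !(cv.contains color)) = true := by
        simp only [List.all_eq_true, Bool.not_eq_true']
        intro x hx
        rw [← Bool.not_eq_true, List.contains_iff_mem]
        exact hd x hx
      have hm : ((pc : Multiset String) ∩ (cv : Multiset String)) = 0 := by
        by_contra h
        rcases Multiset.exists_mem_of_ne_zero h with ⟨x, hx⟩
        rw [Multiset.mem_inter] at hx
        exact hd x (by simpa using hx.1) (by simpa using hx.2)
      have hM := pvMatchZero pc cv hd
      rw [hall, hm, hM]
      simp
    · push_neg at hd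
      rcases hd with ⟨x, hx, hy⟩
      have hall : pc.all (fun color => !(cv.contains color)) = false := by
        simp only [List.all_eq_false]
        exact ⟨x, hx, by simp [List.contains_iff_mem, hy]⟩
      have hm : ((pc : Multiset String) ∩ (cv : Multiset String)) ≠ 0 := by
        intro h0'
        have : x ∈ (pc : Multiset String) ∩ (cv : Multiset String) := by
          rw [Multiset.mem_inter]; exact ⟨by simpa using hx, by simpa using hy⟩
        rw [h0'] at this; simp at this
      have hm' : Multiset.card ((pc : Multiset String) ∩ (cv : Multiset String)) ≠ 0 := by
        intro h; exact hm (Multiset.card_eq_zero.mp h)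
      have : ¬ ((Multiset.card ((pc : Multiset String) ∩ (cv : Multiset String)) : Int) = 0) := by
        exact_mod_cast hm'
      have h00 : ((0 : Int) + 0) = 0 := by norm_num
      rw [hall, h00, decide_eq_false this, Bool.and_false]
  · have htpos : 0 < red + white := lt_of_le_of_ne h0 (Ne.symm ht)
    have hnc : (((red + white).toNat : Nat) : Int) = red + white := Int.toNat_of_nonneg h0
    have hA : check_if_pattern_applies_on_combination (red, white) pc cv
        = mainLoop red pc cv ((pyCombos cv (red + white).toNat).map sortS)
            ((pyCombos pc (red + white).toNat).map sortS) := by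
      unfold check_if_pattern_applies_on_combination
      simp [ht]
    have hl : ∀ c ∈ (pyCombos pc (red + white).toNat).map sortS,
        ((c : List String) : Multiset String) ≤ (pc : Multiset String)
          ∧ c.length = (red + white).toNat := by
      intro c hc
      rcases List.mem_map.mp hc with ⟨d, hd, rfl⟩
      obtain ⟨hdsub, hdlen⟩ := (pvMemCombos pc (red + white).toNat d).mp hd
      constructor
      · rw [pvSortSCoe]; exact Multiset.coe_le.mpr hdsub.subperm
      · unfold sortS
        rw [(PySem.List.sorted_perm d (fun s => s) false).length_eq]
        exact hdlen
    by_cases hm : Multiset.card ((pc : Multiset String) ∩ (cv : Multiset String)) = (red + white).toNat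
    · have hlenpc : pc.length ≤ cv.length := by
        rcases hdisj with h | h | h
        · exact h
        · exact absurd h ht
        · exfalso
          have hle : Multiset.card ((pc : Multiset String) ∩ (cv : Multiset String)) ≤ cv.length := by
            have hcc := Multiset.card_le_card
              (Multiset.inter_le_right (s := (pc : Multiset String)) (t := (cv : Multiset String)))
            rwa [Multiset.coe_card] at hcc
          omega
      rw [hA, pvMainLoopEq red pc cv (red + white).toNat hm hlenpc _ hl]
      have hany : ((pyCombos pc (red + white).toNat).map sortS).any
          (fun c => decide ((c : Multiset String) ≤ (cv : Multiset String))) = true := by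
        rcases pvExistsPass pc cv (red + white).toNat (le_of_eq hm.symm) with ⟨c, hc, hle⟩
        rw [List.any_eq_true]
        refine ⟨sortS c, List.mem_map.mpr ⟨c, hc, rfl⟩, ?_⟩
        rw [pvSortSCoe]
        simpa using hle
      have hmi : ((Multiset.card ((pc : Multiset String) ∩ (cv : Multiset String)) : Int)
          = red + white) := by rw [hm]; exact hnc
      rw [hany, decide_eq_true hmi, Bool.true_and, Bool.and_true]
    · rw [hA, pvMainLoopNe red pc cv (red + white).toNat hm _ hl]
      have : ¬ ((Multiset.card ((pc : Multiset String) ∩ (cv : Multiset String)) : Int)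
          = red + white) := by
        rw [← hnc]
        intro h
        exact hm (by exact_mod_cast h)
      rw [decide_eq_false this, Bool.and_false]
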